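-- pv_equiv track=rewrite | github.com/EmilRyd/eliciting-secrets | scripts/multi_turn_finetuning.py | parse_conversation_for_markers
-- ===== SOURCE A (Python) =====
-- def parse_conversation_for_markers(text):
--     """
--     Analyze the text to find clear patterns of assistant/user turns
--     """
--     # Common patterns to check based on popular chat templates
--     user_indicators = ["user:", "<user>", "human:", "human input", "user", "human"]
--     assistant_indicators = ["assistant:", "<assistant>", "bot:", "assistant", "model", "ai:"]
--
--     # Look for these patterns in the text
--     user_positions = []
--     assistant_positions = []
--
--     for indicator in user_indicators:
--         positions = [i for i in range(len(text)) if text[i:i+len(indicator)].lower() == indicator.lower()]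
--         user_positions.extend(positions)
--
--     for indicator in assistant_indicators:
--         positions = [i for i in range(len(text)) if text[i:i+len(indicator)].lower() == indicator.lower()]
--         assistant_positions.extend(positions)
--
--     # Sort by position
--     user_positions.sort()
--     assistant_positions.sort()
--
--     return user_positions, assistant_positions
-- ===== SOURCE B (Python) =====
-- def parse_conversation_for_markers(text):
--     """
--     Analyze the text to find clear patterns of assistant/user turns.
--     Single position-major pass: lowercase the text once, then for each
--     position test every indicator; results come out already sorted.
--     """
--     user_indicators = ["user:", "<user>", "human:", "human input", "user", "human"]
--     assistant_indicators = ["assistant:", "<assistant>", "bot:", "assistant", "model", "ai:"]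
--
--     tl = text.lower()
--     user_positions = []
--     assistant_positions = []
--     for i in range(len(tl)):
--         for indicator in user_indicators:
--             if tl.startswith(indicator, i):
--                 user_positions.append(i)
--         for indicator in assistant_indicators:
--             if tl.startswith(indicator, i):
--                 assistant_positions.append(i)
--     return user_positions, assistant_positions
-- ===== Notes on version B (the rewrite author's own statement) =====
-- stated objective: faster
-- what changed: Replaces A's twelve per-indicator scans of the text (each re-lowercasing a slice at every offset) plus a final sort per list with a single position-major pass over the once-lowercased text that tests every indicator at each offset and emits positions already in sorted order (no sort).
import Mathlib
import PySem

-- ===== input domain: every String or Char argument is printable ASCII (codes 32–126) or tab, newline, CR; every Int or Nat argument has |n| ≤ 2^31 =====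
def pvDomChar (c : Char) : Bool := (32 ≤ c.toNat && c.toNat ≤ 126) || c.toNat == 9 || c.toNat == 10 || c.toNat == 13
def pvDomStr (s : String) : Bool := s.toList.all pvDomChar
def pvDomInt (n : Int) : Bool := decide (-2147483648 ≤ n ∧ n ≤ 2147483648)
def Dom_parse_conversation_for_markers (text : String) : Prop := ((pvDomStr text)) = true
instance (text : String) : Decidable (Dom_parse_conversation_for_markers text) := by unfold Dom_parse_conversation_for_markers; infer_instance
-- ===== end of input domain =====

-- B replaces A's per-indicator full scans followed by a sort with one position-major pass
-- over the lowercased text that emits positions already in order (objective: alternative).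

-- ===== PORT A =====
-- A: for each indicator, a comprehension over range(len(text)) comparing the lowered
-- slice text[i:i+len(ind)] with the lowered indicator; extend; final sort per list.
def parse_conversation_for_markers (text : String) : List Int × List Int :=
  let user_indicators : List String := ["user:", "<user>", "human:", "human input", "user", "human"]
  let assistant_indicators : List String := ["assistant:", "<assistant>", "bot:", "assistant", "model", "ai:"]
  let user_positions : List Int :=
    user_indicators.foldl (fun acc indicator =>
      acc ++ (PySem.List.pyRange 0 (PySem.Str.len text) 1).filter (fun i =>
        PySem.Chars.lower (PySem.Str.slice text (some i) (some (i + PySem.Str.len indicator))).toList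
          == PySem.Chars.lower indicator.toList)) []
  let assistant_positions : List Int :=
    assistant_indicators.foldl (fun acc indicator =>
      acc ++ (PySem.List.pyRange 0 (PySem.Str.len text) 1).filter (fun i =>
        PySem.Chars.lower (PySem.Str.slice text (some i) (some (i + PySem.Str.len indicator))).toList
          == PySem.Chars.lower indicator.toList)) []
  (PySem.List.sorted user_positions (fun x => x) false,
   PySem.List.sorted assistant_positions (fun x => x) false)

-- ===== PORT B =====
-- B: lowercase once, then one fold over range(len(tl)); per position, append i for each
-- matching indicator.  Python's tl.startswith(ind, i) with 0 ≤ i < len(tl) is exactly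
-- PySem.Chars.startswith on (tl.drop i.toNat) — ported by hand, exact on that range.
def parse_conversation_for_markers_alt (text : String) : List Int × List Int :=
  let user_indicators : List String := ["user:", "<user>", "human:", "human input", "user", "human"]
  let assistant_indicators : List String := ["assistant:", "<assistant>", "bot:", "assistant", "model", "ai:"]
  let tl : List Char := PySem.Chars.lower text.toList
  (PySem.List.pyRange 0 (PySem.Chars.len tl) 1).foldl
    (fun acc i =>
      (user_indicators.foldl (fun a indicator =>
          if PySem.Chars.startswith (tl.drop i.toNat) indicator.toList then a ++ [i] else a) acc.1,
       assistant_indicators.foldl (fun a indicator =>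
          if PySem.Chars.startswith (tl.drop i.toNat) indicator.toList then a ++ [i] else a) acc.2))
    ([], [])

-- ===== PRECONDITION & SPEC =====
def Spec_parse_conversation_for_markers (text : String) (out : List Int × List Int) : Prop := out = parse_conversation_for_markers_alt text
instance (text : String) (out : List Int × List Int) : Decidable (Spec_parse_conversation_for_markers text out) := by unfold Spec_parse_conversation_for_markers; infer_instance

-- ===== CLAIM (what is proved, stated in full; the proofs are below) =====
def Claim_equal_parse_conversation_for_markers : Prop := ∀ (text : String), Dom_parse_conversation_for_markers text → Spec_parse_conversation_for_markers text (parse_conversation_for_markers text)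

-- ===== LEMMAS AND PROOFS =====

theorem pv_coe_flatMap {δ γ : Type} (l : List δ) (g : δ → List γ) :
    ((l.flatMap g : List γ) : Multiset γ) = Multiset.bind (l : Multiset δ) (fun a => ((g a : List γ) : Multiset γ)) := by
  induction l with
  | nil => simp
  | cons x t ih => simp [List.flatMap_cons]

theorem pv_flatMap_swap_perm {α β γ : Type} (l1 : List α) (l2 : List β) (f : α → β → List γ) :
    (l1.flatMap fun a => l2.flatMap fun b => f a b).Perm (l2.flatMap fun b => l1.flatMap fun a => f a b) := by
  rw [← Multiset.coe_eq_coe]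
  simp only [pv_coe_flatMap]
  exact Multiset.bind_bind _ _

theorem pv_filter_eq_flatMap {α : Type} (l : List α) (q : α → Bool) :
    l.filter q = l.flatMap (fun x => if q x then [x] else []) := by
  induction l with
  | nil => rfl
  | cons x t ih => by_cases h : q x <;> simp [List.flatMap_cons, h, ih]

theorem pv_map_const_filter {α β : Type} (l : List α) (r : α → Bool) (i : β) :
    (l.filter r).map (fun _ => i) = l.flatMap (fun x => if r x then [i] else []) := by
  induction l with
  | nil => rfl
  | cons x t ih => by_cases h : r x <;> simp [List.flatMap_cons, h, ih]

-- one side of the pair: A's sorted concatenation of per-indicator scans equals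
-- B's position-major fold, given the two matching conditions agree on 0 ≤ i < n
theorem pv_side_eq (inds : List String) (n : Int) (p q : String → Int → Bool)
    (hpq : ∀ ind ∈ inds, ∀ i : Int, 0 ≤ i → i < n → p ind i = q ind i) :
    PySem.List.sorted (inds.foldl (fun acc ind => acc ++ (PySem.List.pyRange 0 n 1).filter (p ind)) []) (fun x => x) false
      = (PySem.List.pyRange 0 n 1).foldl (fun acc i => inds.foldl (fun a ind => if q ind i then a ++ [i] else a) acc) [] := by
  have hinner : ∀ (i : Int) (acc : List Int),
      inds.foldl (fun a ind => if q ind i then a ++ [i] else a) acc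
        = acc ++ (inds.filter (fun ind => q ind i)).map (fun _ => i) :=
    fun i acc => PySem.List.foldl_append_if (fun ind => q ind i) (fun _ => i) inds acc
  have hRHS : (PySem.List.pyRange 0 n 1).foldl (fun acc i => inds.foldl (fun a ind => if q ind i then a ++ [i] else a) acc) []
      = (PySem.List.pyRange 0 n 1).flatMap (fun i => inds.flatMap (fun ind => if q ind i then [i] else [])) := by
    simp only [hinner]
    rw [PySem.List.foldl_append_eq_flatMap]
    simp only [List.nil_append]
    exact List.flatMap_congr (fun i _ => pv_map_const_filter inds (fun ind => q ind i) i)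
  rw [hRHS, PySem.List.foldl_append_eq_flatMap, List.nil_append]
  apply PySem.List.sorted_id_eq_of_perm_of_pairwise
  · -- permutation: swap the two flatMaps
    have hA : inds.flatMap (fun ind => (PySem.List.pyRange 0 n 1).filter (p ind))
        = inds.flatMap (fun ind => (PySem.List.pyRange 0 n 1).flatMap (fun i => if q ind i then [i] else [])) := by
      refine List.flatMap_congr (fun ind hind => ?_)
      rw [List.filter_congr (fun i hi => by
            rcases PySem.List.mem_pyRange_one.mp hi with ⟨h0, h1⟩
            exact hpq ind hind i h0 h1)]
      exact pv_filter_eq_flatMap _ _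
    rw [hA]
    exact pv_flatMap_swap_perm (PySem.List.pyRange 0 n 1) inds (fun i ind => if q ind i then [i] else [])
  · -- B's list is nondecreasing: inner blocks are constant, range is increasing
    have hmem : ∀ (i x : Int), x ∈ inds.flatMap (fun ind => if q ind i then [i] else []) → x = i := by
      intro i x hx
      rcases List.mem_flatMap.mp hx with ⟨ind, _, hxi⟩
      split at hxi <;> simp_all
    refine List.pairwise_flatMap.mpr ⟨?_, ?_⟩
    · intro i _
      exact List.pairwise_of_forall_mem_list (fun x hx y hy => by rw [hmem i x hx, hmem i y hy])
    · exact (PySem.List.pairwise_lt_pyRange_one 0 n).imp (fun {a b} hab x hx y hy => by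
        rw [hmem a x hx, hmem b y hy]; exact le_of_lt hab)

-- the two per-position matching conditions agree (indicators are already lowercase)
theorem pv_cond_eq (text : String) (ind : String) (i : Int) (h0 : 0 ≤ i)
    (hl : PySem.Chars.lower ind.toList = ind.toList) :
    (PySem.Chars.lower (PySem.Str.slice text (some i) (some (i + PySem.Str.len ind))).toList
       == PySem.Chars.lower ind.toList)
      = PySem.Chars.startswith ((PySem.Chars.lower text.toList).drop i.toNat) ind.toList := by
  rw [hl]
  have hlen : PySem.Str.len ind = (ind.toList.length : Int) := by simp [PySem.Str.len_eq]
  have hbr : (PySem.Str.slice text (some i) (some (i + PySem.Str.len ind))).toList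
      = PySem.List.slice text.toList (some i) (some (i + PySem.Str.len ind)) := by
    simp [PySem.Str.slice]
  have hslice : (PySem.Str.slice text (some i) (some (i + PySem.Str.len ind))).toList
      = List.take ind.toList.length (List.drop i.toNat text.toList) := by
    rw [hbr, PySem.List.slice_toNat _ h0 (by omega)]
    congr 1
    omega
  rw [hslice]
  have hlow : PySem.Chars.lower (List.take ind.toList.length (List.drop i.toNat text.toList))
      = List.take ind.toList.length (List.drop i.toNat (PySem.Chars.lower text.toList)) := by
    simp [PySem.Chars.lower, List.map_take, List.map_drop]
  rw [hlow, Bool.eq_iff_iff]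
  simp only [beq_iff_eq, PySem.Chars.startswith_iff, List.prefix_iff_eq_take]
  exact ⟨fun h => h.symm, fun h => h.symm⟩

-- ===== VERDICT (by name: the statement is the Claim_ definition above) =====
theorem parse_conversation_for_markers_spec : Claim_equal_parse_conversation_for_markers := by
  intro text _
  unfold Spec_parse_conversation_for_markers parse_conversation_for_markers parse_conversation_for_markers_alt
  simp only []
  have hn : PySem.Chars.len (PySem.Chars.lower text.toList) = PySem.Str.len text := by
    simp [PySem.Chars.len_eq, PySem.Str.len_eq, PySem.Chars.lower]
  rw [hn, PySem.List.foldl_prod_mk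
    (fun a (i : Int) => List.foldl (fun a indicator =>
        if PySem.Chars.startswith (List.drop i.toNat (PySem.Chars.lower text.toList)) indicator.toList then a ++ [i] else a)
      a ["user:", "<user>", "human:", "human input", "user", "human"])
    (fun a (i : Int) => List.foldl (fun a indicator =>
        if PySem.Chars.startswith (List.drop i.toNat (PySem.Chars.lower text.toList)) indicator.toList then a ++ [i] else a)
      a ["assistant:", "<assistant>", "bot:", "assistant", "model", "ai:"]),
    Prod.mk.injEq]
  constructor
  · exact pv_side_eq _ _ _ _ (fun ind hind i h0 _ =>
      pv_cond_eq text ind i h0 (by fin_cases hind <;> decide))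
  · exact pv_side_eq _ _ _ _ (fun ind hind i h0 _ =>
      pv_cond_eq text ind i h0 (by fin_cases hind <;> decide))
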